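-- pv_equiv track=rewrite | github.com/nishio/atcoder | abc179/d.py | solve
-- ===== SOURCE A (Python) =====
-- MOD = 998244353
--
-- def solve(N, K, SS):
--     count = [0] * (N + 10)
--     count[0] = 1
--     accum = [0] * (N + 10)
--     accum[0] = 1
--
--     for pos in range(1, N):
--         ret = 0
--         for left, right in SS:
--             start = pos - right - 1
--             end = pos - left
--             ret += (accum[end] - accum[start])
--             ret %= MOD
--         count[pos] = ret
--         accum[pos] = accum[pos - 1] + ret
--
--     ret = count[N - 1]
--     return ret % MOD
-- ===== SOURCE B (Python) =====
-- MOD = 998244353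
--
--
-- def solve(N, K, SS):
--     # Direct window-sum DP: one growing list, no prefix-sum array.
--     if N < 1:
--         return 0
--     dp = [1]
--     for pos in range(1, N):
--         ret = 0
--         for left, right in SS:
--             lo = max(pos - right, 0)
--             hi = max(pos - left + 1, 0)
--             ret = (ret + sum(dp[lo:hi])) % MOD
--         dp.append(ret)
--     return dp[N - 1] % MOD
-- ===== Notes on version B (the rewrite author's own statement) =====
-- stated objective: simpler
-- what changed: Replaces A's two preallocated arrays and its backward prefix-sum difference queries (with the negative-index trick) by a single growing dp list whose transitions are computed as direct sums over slice windows, with ways(N)=0 for an empty board.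
-- outside the precondition, e.g. on solve(3, 1, [(0, 1)]): A returns 998244352, B returns 1; on solve(2, 2, [(0, 0), (0, 0)]): A returns 998244351, B returns 0
import Mathlib
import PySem

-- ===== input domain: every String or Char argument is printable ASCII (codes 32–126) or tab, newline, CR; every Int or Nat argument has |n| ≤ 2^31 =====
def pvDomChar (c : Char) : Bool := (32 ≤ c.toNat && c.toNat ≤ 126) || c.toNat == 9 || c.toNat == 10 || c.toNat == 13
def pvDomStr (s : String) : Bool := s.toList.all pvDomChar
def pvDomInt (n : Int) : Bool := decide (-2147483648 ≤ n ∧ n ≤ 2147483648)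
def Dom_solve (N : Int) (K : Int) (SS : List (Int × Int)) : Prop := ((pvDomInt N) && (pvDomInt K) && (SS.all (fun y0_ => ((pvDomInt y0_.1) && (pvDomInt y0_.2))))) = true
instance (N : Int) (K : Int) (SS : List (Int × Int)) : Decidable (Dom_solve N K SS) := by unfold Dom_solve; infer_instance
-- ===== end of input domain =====

-- B replaces A's two preallocated arrays and backward prefix-sum queries by a single
-- growing dp list whose transitions are direct sums over slice windows (objective: simpler).

-- ===== PORT A =====
def MOD : Int := 998244353


def solve (N : Int) (K : Int) (SS : List (Int × Int)) : Int :=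
  let count0 := PySem.List.pySetD (List.replicate (N + 10).toNat (0 : Int)) 0 1
  let accum0 := PySem.List.pySetD (List.replicate (N + 10).toNat (0 : Int)) 0 1
  let st := (PySem.List.pyRange 1 N 1).foldl (fun (st : List Int × List Int) pos =>
      let ret := SS.foldl (fun ret lr =>
          let start := pos - lr.2 - 1
          let stop := pos - lr.1
          PySem.Int.mod (ret + (PySem.List.pyGetD st.2 stop 0 - PySem.List.pyGetD st.2 start 0)) MOD) 0
      (PySem.List.pySetD st.1 pos ret,
       PySem.List.pySetD st.2 pos (PySem.List.pyGetD st.2 (pos - 1) 0 + ret)))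
    (count0, accum0)
  PySem.Int.mod (PySem.List.pyGetD st.1 (N - 1) 0) MOD

def solve_alt (N : Int) (K : Int) (SS : List (Int × Int)) : Int :=
  if N < 1 then 0 else
  let dp := (PySem.List.pyRange 1 N 1).foldl (fun (dp : List Int) pos =>
      let ret := SS.foldl (fun ret lr =>
          let lo := max (pos - lr.2) 0
          let hi := max (pos - lr.1 + 1) 0
          PySem.Int.mod (ret + (PySem.List.slice dp (some lo) (some hi)).sum) MOD) 0
      dp ++ [ret]) [1]
  PySem.Int.mod (PySem.List.pyGetD dp (N - 1) 0) MOD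

-- ===== PRECONDITION & SPEC =====
-- Pre_ excludes the inputs on which A raises IndexError (N ≤ -5, or a segment pair so far
-- out of range that an accum index leaves the padded array) and the out-of-domain segment
-- pairs straddling the origin or with left > right + 1, on which A's returned value is an
-- artefact of reading not-yet-written or negative-index-wrapped cells of its padded arrays.
def Pre_solve (N : Int) (K : Int) (SS : List (Int × Int)) : Prop :=
  -4 ≤ N ∧ (N ≤ 1 ∨ ∀ lr ∈ SS,
    (1 ≤ lr.1 ∧ lr.1 ≤ lr.2 + 1 ∧ lr.2 ≤ N + 9) ∨
    (-10 ≤ lr.1 ∧ lr.1 ≤ 0 ∧ -11 ≤ lr.2 ∧ lr.2 ≤ -1))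
instance (N : Int) (K : Int) (SS : List (Int × Int)) : Decidable (Pre_solve N K SS) := by unfold Pre_solve; infer_instance

def pvWitness_solve : Int × Int × (List (Int × Int)) := (4, 2, [(1, 1), (3, 4)])

def Spec_solve (N : Int) (K : Int) (SS : List (Int × Int)) (out : Int) : Prop := out = solve_alt N K SS
instance (N : Int) (K : Int) (SS : List (Int × Int)) (out : Int) : Decidable (Spec_solve N K SS out) := by unfold Spec_solve; infer_instance

-- ===== CLAIM (what is proved, stated in full; the proofs are below) =====
def Claim_equal_solve : Prop := ∀ (N : Int) (K : Int) (SS : List (Int × Int)), Dom_solve N K SS → Pre_solve N K SS → Spec_solve N K SS (solve N K SS)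

-- ===== LEMMAS AND PROOFS =====

-- proof-side names for the two loop bodies

def stepA (SS : List (Int × Int)) (st : List Int × List Int) (pos : Int) : List Int × List Int :=
  let ret := SS.foldl (fun ret lr =>
      let start := pos - lr.2 - 1
      let stop := pos - lr.1
      PySem.Int.mod (ret + (PySem.List.pyGetD st.2 stop 0 - PySem.List.pyGetD st.2 start 0)) MOD) 0
  (PySem.List.pySetD st.1 pos ret,
   PySem.List.pySetD st.2 pos (PySem.List.pyGetD st.2 (pos - 1) 0 + ret))

def stepB (SS : List (Int × Int)) (dp : List Int) (pos : Int) : List Int :=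
  let ret := SS.foldl (fun ret lr =>
      let lo := max (pos - lr.2) 0
      let hi := max (pos - lr.1 + 1) 0
      PySem.Int.mod (ret + (PySem.List.slice dp (some lo) (some hi)).sum) MOD) 0
  dp ++ [ret]

theorem solve_eq (N K : Int) (SS : List (Int × Int)) :
    solve N K SS = PySem.Int.mod (PySem.List.pyGetD
      ((PySem.List.pyRange 1 N 1).foldl (stepA SS)
        (PySem.List.pySetD (List.replicate (N + 10).toNat (0 : Int)) 0 1,
         PySem.List.pySetD (List.replicate (N + 10).toNat (0 : Int)) 0 1)).1 (N - 1) 0) MOD := rfl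

theorem solve_alt_eq (N K : Int) (SS : List (Int × Int)) (hN : 1 ≤ N) :
    solve_alt N K SS = PySem.Int.mod (PySem.List.pyGetD
      ((PySem.List.pyRange 1 N 1).foldl (stepB SS) [1]) (N - 1) 0) MOD := by
  rw [solve_alt, if_neg (by omega)]
  rfl

theorem solve_alt_small (N K : Int) (SS : List (Int × Int)) (hN : N < 1) :
    solve_alt N K SS = 0 := by
  rw [solve_alt, if_pos hN]

def accOf (dp : List Int) : List Int :=
  (List.range dp.length).map (fun j => ((dp.take (j + 1)).sum))

theorem accOf_length (dp : List Int) : (accOf dp).length = dp.length := by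
  simp [accOf]

theorem accOf_getElem (dp : List Int) (k : Nat) (h : k < dp.length) :
    (accOf dp)[k]'(by simpa [accOf] using h) = (dp.take (k + 1)).sum := by
  simp [accOf]

theorem drop_take_sum (dp : List Int) (a b : Nat) (hab : a ≤ b) :
    (((dp.drop a).take (b - a)).sum : Int) = (dp.take b).sum - (dp.take a).sum := by
  have h : dp.take b = dp.take a ++ (dp.drop a).take (b - a) := by
    rw [← List.take_add]
    congr 1
    omega
  rw [h, List.sum_append]
  ring
theorem pyGetD_pad_lt {xs : List Int} {k : Nat} (pad : Nat) (h : k < xs.length) :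
    PySem.List.pyGetD (xs ++ List.replicate pad (0:Int)) (k : Int) 0 = xs[k] := by
  rw [PySem.List.pyGetD_natCast]
  rw [List.getD_eq_getElem?_getD, List.getElem?_append_left h, List.getElem?_eq_getElem h]
  rfl

theorem pyGetD_pad_zero {xs : List Int} {pad : Nat} {i : Int}
    (h1 : (0 ≤ i ∧ (xs.length : Int) ≤ i) ∨ (i < 0 ∧ (xs.length : Int) ≤ (xs.length + pad : Int) + i)) :
    PySem.List.pyGetD (xs ++ List.replicate pad (0:Int)) i 0 = 0 := by
  rcases h1 with ⟨hp, hli⟩ | ⟨hn, h1'⟩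
  · rw [PySem.List.pyGetD_of_nonneg _ _ hp]
    rw [List.getD_eq_getElem?_getD]
    rcases Nat.lt_or_ge i.toNat (xs.length + pad) with hlt | hge
    · have hx : xs.length ≤ i.toNat := by omega
      rw [List.getElem?_append_right hx]
      rw [List.getElem?_eq_getElem (by simp; omega)]
      simp
    · rw [List.getElem?_eq_none (by simpa using hge)]
      rfl
  · -- negative index
    set L := xs.length + pad with hL
    have hlen : (xs ++ List.replicate pad (0:Int)).length = L := by simp [hL]
    have hk : i = -(((-i).toNat : Nat) : Int) := by omega
    rw [hk]
    unfold PySem.List.pyGetD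
    rw [PySem.List.pyGet?_neg_natCast _ _ (by omega) (by omega)]
    rw [hlen]
    have hx : xs.length ≤ L - (-i).toNat := by omega
    rw [List.getElem?_append_right hx]
    rw [List.getElem?_eq_getElem (by simp [hL]; omega)]
    simp

-- one inner-loop segment: A's prefix-sum difference equals B's window slice sum
theorem seg_eq (N : Int) (dp : List Int) (pos l r : Int)
    (hlen : (dp.length : Int) = pos) (hpos : 1 ≤ pos) (hposN : pos ≤ N - 1)
    (hC : (1 ≤ l ∧ l ≤ r + 1 ∧ r ≤ N + 9) ∨ (-10 ≤ l ∧ l ≤ 0 ∧ -11 ≤ r ∧ r ≤ -1)) :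
    PySem.List.pyGetD (accOf dp ++ List.replicate ((N + 10).toNat - dp.length) (0:Int)) (pos - l) 0
      - PySem.List.pyGetD (accOf dp ++ List.replicate ((N + 10).toNat - dp.length) (0:Int)) (pos - r - 1) 0
    = (PySem.List.slice dp (some (max (pos - r) 0)) (some (max (pos - l + 1) 0))).sum := by
  have hacc : (accOf dp).length = dp.length := accOf_length dp
  have hpadpos : (dp.length : Int) + ((N + 10).toNat - dp.length : Nat) = (N + 10 : Int) := by
    have : (dp.length : Int) ≤ N + 10 := by omega
    omega
  rcases hC with ⟨hl, hlr, hr⟩ | ⟨hl0, hl1, hr0, hr1⟩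
  case inr =>
    -- pair fully left of the origin: both reads hit still-zero cells, B's window is empty
    have hread_e : PySem.List.pyGetD (accOf dp ++ List.replicate ((N + 10).toNat - dp.length) (0:Int)) (pos - l) 0 = 0 := by
      apply pyGetD_pad_zero
      left
      refine ⟨by omega, ?_⟩
      rw [hacc]; omega
    have hread_s : PySem.List.pyGetD (accOf dp ++ List.replicate ((N + 10).toNat - dp.length) (0:Int)) (pos - r - 1) 0 = 0 := by
      apply pyGetD_pad_zero
      left
      refine ⟨by omega, ?_⟩
      rw [hacc]; omega
    rw [hread_e, hread_s]
    have hmaxr : max (pos - r) 0 = pos - r := by omega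
    rw [hmaxr, PySem.List.slice_toNat dp (by omega) (le_max_right _ _)]
    rw [List.drop_eq_nil_of_le (by omega : dp.length ≤ (pos - r).toNat)]
    simp
  case inl =>
  rcases le_or_gt 0 (pos - l) with he | he
  · -- e = pos - l ≥ 0
    have hek : pos - l = ((pos - l).toNat : Int) := by omega
    have heklt : (pos - l).toNat < dp.length := by omega
    have hread_e : PySem.List.pyGetD (accOf dp ++ List.replicate ((N + 10).toNat - dp.length) (0:Int)) (pos - l) 0
        = (dp.take ((pos - l).toNat + 1)).sum := by
      rw [hek, pyGetD_pad_lt _ (by omega : (pos - l).toNat < (accOf dp).length)]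
      exact accOf_getElem dp _ heklt
    rcases le_or_gt 0 (pos - r - 1) with hs | hs
    · -- s ≥ 0
      have hsk : pos - r - 1 = ((pos - r - 1).toNat : Int) := by omega
      have hsklt : (pos - r - 1).toNat < dp.length := by omega
      have hread_s : PySem.List.pyGetD (accOf dp ++ List.replicate ((N + 10).toNat - dp.length) (0:Int)) (pos - r - 1) 0
          = (dp.take ((pos - r - 1).toNat + 1)).sum := by
        rw [hsk, pyGetD_pad_lt _ (by omega : (pos - r - 1).toNat < (accOf dp).length)]
        exact accOf_getElem dp _ hsklt
      rw [hread_e, hread_s]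
      have hmaxr : max (pos - r) 0 = pos - r := by omega
      have hmaxl : max (pos - l + 1) 0 = pos - l + 1 := by omega
      have h1 : (pos - l + 1).toNat = (pos - l).toNat + 1 := by omega
      have h2 : (pos - r).toNat = (pos - r - 1).toNat + 1 := by omega
      rw [hmaxr, hmaxl, PySem.List.slice_toNat dp (show (0:Int) ≤ pos - r by omega) (show (0:Int) ≤ pos - l + 1 by omega)]
      rw [h1, h2, drop_take_sum dp _ _ (by omega)]
    · -- s < 0 : A reads 0, B's window starts at 0
      have hread_s : PySem.List.pyGetD (accOf dp ++ List.replicate ((N + 10).toNat - dp.length) (0:Int)) (pos - r - 1) 0 = 0 := by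
        apply pyGetD_pad_zero
        right
        constructor
        · omega
        · rw [hacc]; omega
      rw [hread_e, hread_s]
      have hmaxr : max (pos - r) 0 = 0 := by omega
      have hmaxl : max (pos - l + 1) 0 = pos - l + 1 := by omega
      have h1 : (pos - l + 1).toNat = (pos - l).toNat + 1 := by omega
      rw [hmaxr, hmaxl, PySem.List.slice_toNat dp (le_refl (0:Int)) (show (0:Int) ≤ pos - l + 1 by omega)]
      rw [h1]
      simp
  · -- e < 0 : both sides are 0
    have hread_e : PySem.List.pyGetD (accOf dp ++ List.replicate ((N + 10).toNat - dp.length) (0:Int)) (pos - l) 0 = 0 := by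
      apply pyGetD_pad_zero
      right
      refine ⟨by omega, ?_⟩
      rw [hacc]; omega
    have hread_s : PySem.List.pyGetD (accOf dp ++ List.replicate ((N + 10).toNat - dp.length) (0:Int)) (pos - r - 1) 0 = 0 := by
      apply pyGetD_pad_zero
      right
      refine ⟨by omega, ?_⟩
      rw [hacc]; omega
    rw [hread_e, hread_s]
    have hmaxl : max (pos - l + 1) 0 = 0 := by omega
    rw [hmaxl, PySem.List.slice_toNat dp (le_max_right _ _) (le_refl (0:Int))]
    simp

theorem accOf_singleton : accOf [(1:Int)] = [1] := by decide

theorem accOf_append_singleton (dp : List Int) (v : Int) :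
    accOf (dp ++ [v]) = accOf dp ++ [dp.sum + v] := by
  unfold accOf
  have hlen : (dp ++ [v]).length = dp.length + 1 := by simp
  rw [hlen, List.range_succ, List.map_append]
  congr 1
  · apply List.map_congr_left
    intro j hj
    have hj' : j + 1 ≤ dp.length := by
      have := List.mem_range.mp hj; omega
    rw [List.take_append_of_le_length hj']
  · simp

-- B's running list after processing positions 1..p
def dpOf (SS : List (Int × Int)) (p : Nat) : List Int :=
  (PySem.List.pyRange 1 (1 + (p : Int)) 1).foldl (stepB SS) [1]

theorem init_eq (n : Nat) (h : 1 ≤ n) :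
    PySem.List.pySetD (List.replicate n (0:Int)) 0 1 = [1] ++ List.replicate (n - 1) 0 := by
  rw [PySem.List.pySetD_of_nonneg _ _ le_rfl]
  obtain ⟨m, rfl⟩ : ∃ m, n = m + 1 := ⟨n - 1, by omega⟩
  simp [List.replicate_succ]

theorem set_pad (xs : List Int) (m : Nat) (hm : 1 ≤ m) (v : Int) :
    (xs ++ List.replicate m (0:Int)).set xs.length v
      = xs ++ [v] ++ List.replicate (m - 1) 0 := by
  rw [List.set_append]
  simp only [lt_irrefl, Nat.sub_self]
  obtain ⟨k, rfl⟩ : ∃ k, m = k + 1 := ⟨m - 1, by omega⟩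
  simp [List.replicate_succ]

theorem loop_inv (N : Int) (SS : List (Int × Int)) (hN : 1 ≤ N)
    (hSS : ∀ lr ∈ SS, (1 ≤ lr.1 ∧ lr.1 ≤ lr.2 + 1 ∧ lr.2 ≤ N + 9) ∨
      (-10 ≤ lr.1 ∧ lr.1 ≤ 0 ∧ -11 ≤ lr.2 ∧ lr.2 ≤ -1)) (p : Nat) (hp : (p : Int) ≤ N - 1) :
    ((PySem.List.pyRange 1 (1 + (p : Int)) 1).foldl (stepA SS)
        ([1] ++ List.replicate ((N + 10).toNat - 1) 0, [1] ++ List.replicate ((N + 10).toNat - 1) 0))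
      = (dpOf SS p ++ List.replicate ((N + 10).toNat - (p + 1)) 0,
         accOf (dpOf SS p) ++ List.replicate ((N + 10).toNat - (p + 1)) 0)
    ∧ (dpOf SS p).length = p + 1 := by
  induction p with
  | zero =>
      rw [dpOf, show (1 + ((0:Nat):Int)) = 1 by norm_num, PySem.List.pyRange_one_eq_nil le_rfl]
      simp [accOf_singleton]
  | succ p ih =>
      have hp' : (p : Int) ≤ N - 1 := by push_cast at hp ⊢; omega
      obtain ⟨hfold, hlen⟩ := ih hp'
      have hrange : PySem.List.pyRange 1 (1 + ((p + 1 : Nat) : Int)) 1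
          = PySem.List.pyRange 1 (1 + (p : Int)) 1 ++ [1 + (p : Int)] := by
        rw [show (1 + ((p + 1 : Nat) : Int)) = (1 + (p : Int)) + 1 by push_cast; ring]
        exact PySem.List.pyRange_one_succ_right (by omega)
      have hdp1 : dpOf SS (p + 1) = stepB SS (dpOf SS p) (1 + (p : Int)) := by
        rw [dpOf, hrange, List.foldl_append]
        rfl
      -- the two inner folds compute the same ret
      have hret : (SS.foldl (fun ret lr =>
            PySem.Int.mod (ret + (PySem.List.pyGetD (accOf (dpOf SS p) ++ List.replicate ((N + 10).toNat - (p + 1)) 0) ((1 + (p : Int)) - lr.1) 0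
              - PySem.List.pyGetD (accOf (dpOf SS p) ++ List.replicate ((N + 10).toNat - (p + 1)) 0) ((1 + (p : Int)) - lr.2 - 1) 0)) MOD) 0)
          = (SS.foldl (fun ret lr =>
            PySem.Int.mod (ret + (PySem.List.slice (dpOf SS p) (some (max ((1 + (p : Int)) - lr.2) 0)) (some (max ((1 + (p : Int)) - lr.1 + 1) 0))).sum) MOD) 0) := by
        apply PySem.List.foldl_congr_mem
        intro acc lr hlr
        have hseg := seg_eq N (dpOf SS p) (1 + (p : Int)) lr.1 lr.2
          (by rw [hlen]; push_cast; ring) (by omega) (by push_cast at hp; omega) (hSS lr hlr)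
        rw [hlen] at hseg
        rw [hseg]
      constructor
      · rw [hrange, List.foldl_append, hfold, hdp1]
        show stepA SS _ _ = _
        simp only [stepA, stepB]
        rw [hret]
        set ret := (SS.foldl (fun ret lr =>
            PySem.Int.mod (ret + (PySem.List.slice (dpOf SS p) (some (max ((1 + (p : Int)) - lr.2) 0)) (some (max ((1 + (p : Int)) - lr.1 + 1) 0))).sum) MOD) 0) with hretdef
        have hposcast : (1 + (p : Int)) = (((p + 1 : Nat)) : Int) := by push_cast; ring
        have hpad1 : 1 ≤ (N + 10).toNat - (p + 1) := by omega
        have hpadsub : (N + 10).toNat - (p + 1) - 1 = (N + 10).toNat - (p + 1 + 1) := by omega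
        simp only [Prod.mk.injEq]
        constructor
        · -- count component
          rw [hposcast, PySem.List.pySetD_natCast]
          rw [show p + 1 = (dpOf SS p).length from hlen.symm]
          rw [set_pad _ _ (by rw [hlen]; exact hpad1)]
          rw [hlen, hpadsub, List.append_assoc]
        · -- accum component
          have hread : PySem.List.pyGetD (accOf (dpOf SS p) ++ List.replicate ((N + 10).toNat - (p + 1)) 0) ((1 + (p : Int)) - 1) 0
              = (dpOf SS p).sum := by
            rw [show (1 + (p : Int)) - 1 = ((p : Nat) : Int) by ring]
            rw [pyGetD_pad_lt _ (by rw [accOf_length, hlen]; omega)]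
            rw [accOf_getElem _ _ (by rw [hlen]; omega)]
            rw [List.take_of_length_le (by rw [hlen])]
          rw [hread]
          rw [hposcast, PySem.List.pySetD_natCast]
          rw [show p + 1 = (accOf (dpOf SS p)).length by rw [accOf_length, hlen]]
          rw [set_pad _ _ (by rw [accOf_length, hlen]; exact hpad1)]
          rw [accOf_length, hlen, hpadsub, accOf_append_singleton, List.append_assoc]
      · rw [hdp1, stepB]
        simp [hlen]

theorem solve_eq_alt (N K : Int) (SS : List (Int × Int)) (hpre : Pre_solve N K SS) :
    solve N K SS = solve_alt N K SS := by
  obtain ⟨hN4, hrest⟩ := hpre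
  rcases le_or_gt N 0 with hN0 | hNpos
  · -- N ≤ 0: A's final read wraps into still-zero padding, B returns 0
    rw [solve_alt_small N K SS (by omega)]
    rw [solve_eq N K SS, PySem.List.pyRange_one_eq_nil (by omega)]
    simp only [List.foldl_nil]
    rw [init_eq _ (by omega)]
    rw [pyGetD_pad_zero (Or.inr ⟨by omega, by simp; omega⟩)]
    decide
  · rcases le_or_gt 2 N with hN2 | hN1
    · -- N ≥ 2: the loop invariant
      have hSS := hrest.resolve_left (by omega)
      rw [solve_eq N K SS, solve_alt_eq N K SS (by omega)]
      rw [init_eq _ (by omega : 1 ≤ (N + 10).toNat)]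
      set p := (N - 1).toNat with hpdef
      have hN1 : 1 + (p : Int) = N := by omega
      rw [← hN1]
      rw [show ((1 + (p : Int)) + 10).toNat = (N + 10).toNat by rw [hN1]]
      obtain ⟨hfold, hlen⟩ := loop_inv N SS (by omega) hSS p (by omega)
      rw [hfold]
      have hidx : (1 + (p : Int)) - 1 = ((p : Nat) : Int) := by ring
      rw [hidx, pyGetD_pad_lt _ (by omega : p < (dpOf SS p).length), PySem.List.pyGetD_natCast]
      show _ = PySem.Int.mod ((dpOf SS p)[p]?.getD 0) MOD
      rw [List.getElem?_eq_getElem (by omega : p < (dpOf SS p).length)]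
      rfl
    · -- N = 1: no loop on either side, both return 1
      have hN1 : N = 1 := by omega
      subst hN1
      rw [solve_eq 1 K SS, solve_alt_eq 1 K SS le_rfl]
      rw [PySem.List.pyRange_one_eq_nil le_rfl]
      simp only [List.foldl_nil]
      rw [init_eq _ (by omega)]
      rw [show (1:Int) - 1 = ((0:Nat) : Int) by ring]
      rw [pyGetD_pad_lt _ (by simp : 0 < [(1:Int)].length), PySem.List.pyGetD_natCast]
      rfl

-- ===== VERDICT (by name: the statement is the Claim_ definition above) =====
theorem solve_spec : Claim_equal_solve := by
  intro N K SS _hdom hpre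
  unfold Spec_solve
  exact solve_eq_alt N K SS hpre
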